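-- pv_equiv track=rewrite | github.com/GitMonsters/octotetrahedral-agi | arc-puzzle-catalog/solves/52561d9e/solver.py | transform
-- ===== SOURCE A (Python) =====
-- from collections import Counter
--
-- def transform(grid: list[list[int]]) -> list[list[int]]:
--     rows = len(grid)
--     cols = len(grid[0])
--     out = [row[:] for row in grid]
--
--     # Find background color (most frequent)
--     color_counts: Counter = Counter()
--     for r in range(rows):
--         for c in range(cols):
--             color_counts[grid[r][c]] += 1
--     bg = color_counts.most_common(1)[0][0]
--
--     # Find the fill: smallest solid rectangle among non-bg colors
--     non_bg_colors = [c for c, _ in color_counts.most_common() if c != bg]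
--
--     fill_color = None
--     fill_bbox = None
--     min_area = float('inf')
--
--     for color in non_bg_colors:
--         min_r = min_c = float('inf')
--         max_r = max_c = -1
--         count = 0
--         for r in range(rows):
--             for c in range(cols):
--                 if grid[r][c] == color:
--                     min_r = min(min_r, r)
--                     max_r = max(max_r, r)
--                     min_c = min(min_c, c)
--                     max_c = max(max_c, c)
--                     count += 1
--         area = (max_r - min_r + 1) * (max_c - min_c + 1)
--         if area == count and area < min_area:
--             min_area = area
--             fill_color = color
--             fill_bbox = (min_r, min_c, max_r, max_c)
--
--     if fill_bbox is None:
--         return out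
--
--     fr1, fc1, fr2, fc2 = fill_bbox
--
--     # Diagonal directions from each corner (away from center)
--     corners = [
--         (fr1, fc1, -1, -1),  # top-left → up-left
--         (fr1, fc2, -1, +1),  # top-right → up-right
--         (fr2, fc1, +1, -1),  # bottom-left → down-left
--         (fr2, fc2, +1, +1),  # bottom-right → down-right
--     ]
--
--     for cr, cc, dr, dc in corners:
--         # Skip 2 cells from the fill corner
--         r = cr + 3 * dr
--         c = cc + 3 * dc
--         # Draw fill color on background cells until grid boundary
--         while 0 <= r < rows and 0 <= c < cols:
--             if out[r][c] == bg:
--                 out[r][c] = fill_color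
--             r += dr
--             c += dc
--
--     return out
-- ===== SOURCE B (Python) =====
-- from collections import Counter
--
-- def transform(grid: list[list[int]]) -> list[list[int]]:
--     rows = len(grid)
--     cols = len(grid[0])
--     out = [row[:] for row in grid]
--
--     # One pass: frequency counter plus per-color running bbox/count stats.
--     counts: Counter = Counter()
--     stats: dict = {}  # color -> [min_r, max_r, min_c, max_c, count]
--     for r in range(rows):
--         for c in range(cols):
--             color = grid[r][c]
--             counts[color] += 1
--             s = stats.get(color)
--             if s is None:
--                 stats[color] = [r, r, c, c, 1]
--             else:
--                 if r < s[0]: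
--                     s[0] = r
--                 if r > s[1]:
--                     s[1] = r
--                 if c < s[2]:
--                     s[2] = c
--                 if c > s[3]:
--                     s[3] = c
--                 s[4] += 1
--
--     bg = counts.most_common(1)[0][0]
--
--     # Smallest solid rectangle among non-bg colors, in most_common order.
--     fill_color = None
--     fill_bbox = None
--     min_area = None
--     for color, _ in counts.most_common():
--         if color == bg:
--             continue
--         mn_r, mx_r, mn_c, mx_c, cnt = stats[color]
--         area = (mx_r - mn_r + 1) * (mx_c - mn_c + 1)
--         if area == cnt and (min_area is None or area < min_area):
--             min_area = area
--             fill_color = color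
--             fill_bbox = (mn_r, mn_c, mx_r, mx_c)
--
--     if fill_bbox is None:
--         return out
--
--     fr1, fc1, fr2, fc2 = fill_bbox
--
--     corners = [
--         (fr1, fc1, -1, -1),
--         (fr1, fc2, -1, +1),
--         (fr2, fc1, +1, -1),
--         (fr2, fc2, +1, +1),
--     ]
--
--     for cr, cc, dr, dc in corners:
--         r = cr + 3 * dr
--         c = cc + 3 * dc
--         while 0 <= r < rows and 0 <= c < cols:
--             if out[r][c] == bg:
--                 out[r][c] = fill_color
--             r += dr
--             c += dc
--
--     return out
-- ===== Notes on version B (the rewrite author's own statement) =====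
-- stated objective: faster
-- what changed: A rescans the whole grid once per non-background color to find its bbox/count; B makes a single pass over the cells maintaining a per-color dict of running [min_r, max_r, min_c, max_c, count] (plus the same Counter), then selects fill color/bbox in most_common() order exactly as A does.
import Mathlib
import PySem

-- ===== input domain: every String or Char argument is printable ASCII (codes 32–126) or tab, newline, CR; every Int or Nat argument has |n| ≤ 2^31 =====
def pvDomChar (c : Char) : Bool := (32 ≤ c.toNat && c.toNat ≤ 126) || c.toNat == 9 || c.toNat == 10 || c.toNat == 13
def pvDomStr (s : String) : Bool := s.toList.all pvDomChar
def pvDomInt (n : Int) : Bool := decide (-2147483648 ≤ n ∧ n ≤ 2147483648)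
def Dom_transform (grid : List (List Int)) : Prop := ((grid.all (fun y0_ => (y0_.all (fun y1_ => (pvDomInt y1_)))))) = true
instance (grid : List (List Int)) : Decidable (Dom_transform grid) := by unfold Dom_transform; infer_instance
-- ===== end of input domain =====

-- B replaces A's per-color full-grid rescans by a single pass that accumulates each color's
-- bbox/count in a dict (objective: faster — one grid traversal instead of one per color).

-- ===== shared helpers (identical Python code in A and B: cell access, most_common, the diagonal drawing) =====
abbrev PvS5 := Int × Int × Int × Int × Int

-- grid[r][c] (indices produced by range(), always in range under Pre_)
def pvCell (grid : List (List Int)) (r c : Int) : Int :=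
  PySem.List.pyGetD (PySem.List.pyGetD grid r []) c 0

-- out[r][c] = v
def pvSetCell (g : List (List Int)) (r c v : Int) : List (List Int) :=
  PySem.List.pySetD g r (PySem.List.pySetD (PySem.List.pyGetD g r []) c v)

-- Counter.most_common(): items sorted by count descending, stable (insertion order on ties)
def pvMostCommon (d : PySem.Dict Int Int) : List (Int × Int) :=
  PySem.List.sorted d.items (fun p => p.2) true

-- the 'while 0 <= r < rows and 0 <= c < cols' drawing loop; r moves by ±1 each step, so
-- (rows+cols).toNat+8 fuel is more than the loop can ever run inside the grid
def pvDrawRay (rows cols bg fill : Int) : Nat → List (List Int) → Int → Int → Int → Int → List (List Int)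
  | 0, g, _, _, _, _ => g
  | fuel+1, g, r, c, dr, dc =>
    if 0 ≤ r ∧ r < rows ∧ 0 ≤ c ∧ c < cols then
      pvDrawRay rows cols bg fill fuel
        (if pvCell g r c = bg then pvSetCell g r c fill else g) (r + dr) (c + dc) dr dc
    else g

-- the 'for cr, cc, dr, dc in corners' loop
def pvDrawCorners (rows cols bg fill : Int) (bbox : Int × Int × Int × Int) (out : List (List Int)) : List (List Int) :=
  match bbox with
  | (fr1, fc1, fr2, fc2) =>
    [(fr1, fc1, (-1 : Int), (-1 : Int)), (fr1, fc2, -1, 1), (fr2, fc1, 1, -1), (fr2, fc2, 1, 1)].foldl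
      (fun g q =>
        match q with
        | (cr, cc, dr, dc) =>
          pvDrawRay rows cols bg fill ((rows + cols).toNat + 8) g (cr + 3 * dr) (cc + 3 * dc) dr dc)
      out

-- ===== PORT A =====
-- A's Counter loop over all cells
def pvCountsA (grid : List (List Int)) (rows cols : Int) : PySem.Dict Int Int :=
  (PySem.List.pyRange 0 rows 1).foldl (fun d r =>
    (PySem.List.pyRange 0 cols 1).foldl (fun d c =>
      d.modify (pvCell grid r c) 0 (· + 1)) d) PySem.Dict.empty

-- A's per-color full-grid scan: (min_r, max_r, min_c, max_c, count); float('inf') ↦ none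
def pvScanA (grid : List (List Int)) (rows cols color : Int) : Option Int × Int × Option Int × Int × Int :=
  (PySem.List.pyRange 0 rows 1).foldl (fun s r =>
    (PySem.List.pyRange 0 cols 1).foldl (fun s c =>
      if pvCell grid r c == color then
        ((match s.1 with | none => some r | some v => some (min v r)), max s.2.1 r,
         (match s.2.2.1 with | none => some c | some v => some (min v c)), max s.2.2.2.1 c,
         s.2.2.2.2 + 1)
      else s) s) (none, -1, none, -1, 0)

def transform (grid : List (List Int)) : List (List Int) :=
  let rows := PySem.List.len grid
  let cols := PySem.List.len (PySem.List.pyGetD grid 0 [])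
  let out := grid.map (fun row => row)   -- out = [row[:] for row in grid] (values; lists are immutable here)
  let counts := pvCountsA grid rows cols
  match pvMostCommon counts with
  | [] => []   -- Python raises IndexError on most_common(1)[0] here; outside Pre_
  | p0 :: _ =>
    let bg := p0.1
    let nonBg := ((pvMostCommon counts).filter (fun p => p.1 != bg)).map (fun p => p.1)
    let sel := nonBg.foldl (fun acc color =>
      match pvScanA grid rows cols color with
      | (some mr, mxr, some mc, mxc, cnt) =>
        let area := (mxr - mr + 1) * (mxc - mc + 1)
        if area == cnt && (match acc.2.2 with | none => true | some m => decide (area < m)) then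
          (some color, some (mr, mc, mxr, mxc), some area)
        else acc
      | _ => acc)   -- min_r/min_c still inf: the float area never equals the int count; unreachable for counted colors
      ((none : Option Int), (none : Option (Int × Int × Int × Int)), (none : Option Int))
    match sel.1, sel.2.1 with
    | some fc, some bbox => pvDrawCorners rows cols bg fc bbox out
    | _, _ => out

-- ===== PORT B =====
-- B's single pass: Counter plus a per-color stats dict [min_r, max_r, min_c, max_c, count]
def pvPassB (grid : List (List Int)) (rows cols : Int) :
    PySem.Dict Int Int × PySem.Dict Int PvS5 :=
  (PySem.List.pyRange 0 rows 1).foldl (fun st r =>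
    (PySem.List.pyRange 0 cols 1).foldl (fun st c =>
      (st.1.modify (pvCell grid r c) 0 (· + 1),
       match st.2.get? (pvCell grid r c) with
       | none => st.2.insert (pvCell grid r c) (r, r, c, c, 1)
       | some s => st.2.insert (pvCell grid r c)
           (if r < s.1 then r else s.1, if s.2.1 < r then r else s.2.1,
            if c < s.2.2.1 then c else s.2.2.1, if s.2.2.2.1 < c then c else s.2.2.2.1,
            s.2.2.2.2 + 1))) st)
    ((PySem.Dict.empty : PySem.Dict Int Int), (PySem.Dict.empty : PySem.Dict Int PvS5))

def transform_alt (grid : List (List Int)) : List (List Int) :=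
  let rows := PySem.List.len grid
  let cols := PySem.List.len (PySem.List.pyGetD grid 0 [])
  let out := grid.map (fun row => row)
  let cs := pvPassB grid rows cols
  match (pvMostCommon cs.1).head? with
  | none => []   -- Python raises IndexError here; outside Pre_
  | some p0 =>
    let bg := p0.1
    let sel := (pvMostCommon cs.1).foldl (fun acc p =>
      if p.1 == bg then acc
      else
        let s := cs.2.getD p.1 (0, 0, 0, 0, 0)   -- stats[color]; always present for counted colors
        let area := (s.2.1 - s.1 + 1) * (s.2.2.2.1 - s.2.2.1 + 1)
        if area == s.2.2.2.2 && (match acc.2.2 with | some m => decide (area < m) | none => true) then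
          (some p.1, some (s.1, s.2.2.1, s.2.1, s.2.2.2.1), some area)
        else acc)
      ((none : Option Int), (none : Option (Int × Int × Int × Int)), (none : Option Int))
    match sel.2.1 with
    | none => out
    | some bbox =>
      match sel.1 with
      | none => out
      | some fc => pvDrawCorners rows cols bg fc bbox out

-- ===== PRECONDITION & SPEC =====
-- Pre_ excludes exactly the inputs where Python A raises: the empty grid and grids whose
-- first row is empty (IndexError on most_common(1)[0]) or whose some row is shorter than
-- row 0 (IndexError on grid[r][c]).
def Pre_transform (grid : List (List Int)) : Prop :=
  grid ≠ [] ∧ grid.headI ≠ [] ∧ ∀ row ∈ grid, grid.headI.length ≤ row.length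
instance (grid : List (List Int)) : Decidable (Pre_transform grid) := by unfold Pre_transform; infer_instance

def pvWitness_transform : List (List Int) := [[1, 1, 2], [1, 1, 1], [1, 1, 1]]

def Spec_transform (grid : List (List Int)) (out : List (List Int)) : Prop := out = transform_alt grid
instance (grid : List (List Int)) (out : List (List Int)) : Decidable (Spec_transform grid out) := by unfold Spec_transform; infer_instance

-- ===== CLAIM (what is proved, stated in full; the proofs are below) =====
def Claim_equal_transform : Prop := ∀ (grid : List (List Int)), Dom_transform grid → Pre_transform grid → Spec_transform grid (transform grid)

-- ===== LEMMAS AND PROOFS =====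

-- the row-major list of all (r, c) cell coordinates
def pvCells0 (rows cols : Int) : List (Int × Int) :=
  (PySem.List.pyRange 0 rows 1).flatMap (fun r => (PySem.List.pyRange 0 cols 1).map (fun c => (r, c)))

-- B's stats update as a function of the previous optional entry
def pvStepB (o : Option PvS5) (rc : Int × Int) : PvS5 :=
  match o with
  | none => (rc.1, rc.1, rc.2, rc.2, 1)
  | some s => (if rc.1 < s.1 then rc.1 else s.1, if s.2.1 < rc.1 then rc.1 else s.2.1,
               if rc.2 < s.2.2.1 then rc.2 else s.2.2.1, if s.2.2.2.1 < rc.2 then rc.2 else s.2.2.2.1,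
               s.2.2.2.2 + 1)

-- A's (inf/-1)-initialised scan state as a view of B's optional stats entry
def pvOfOpt (o : Option PvS5) : Option Int × Int × Option Int × Int × Int :=
  match o with
  | none => (none, -1, none, -1, 0)
  | some s => (some s.1, s.2.1, some s.2.2.1, s.2.2.2.1, s.2.2.2.2)

lemma pvNest {σ : Type} (rows cols : Int) (f : σ → Int → Int → σ) (init : σ) :
    (PySem.List.pyRange 0 rows 1).foldl (fun s r =>
        (PySem.List.pyRange 0 cols 1).foldl (fun s c => f s r c) s) init
      = (pvCells0 rows cols).foldl (fun s rc => f s rc.1 rc.2) init := by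
  simp [pvCells0, List.foldl_flatMap, List.foldl_map]

lemma pvCells0_pos (rows cols : Int) : ∀ rc ∈ pvCells0 rows cols, 0 ≤ rc.1 ∧ 0 ≤ rc.2 := by
  intro rc h
  simp only [pvCells0, List.mem_flatMap, List.mem_map] at h
  obtain ⟨r, hr, c, hc, rfl⟩ := h
  exact ⟨(PySem.List.mem_pyRange_one.mp hr).1, (PySem.List.mem_pyRange_one.mp hc).1⟩

lemma pvDictFold_get? (κ : Int × Int → Int) (v : Option PvS5 → Int × Int → PvS5)
    (l : List (Int × Int)) (d : PySem.Dict Int PvS5) (k : Int) :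
    (l.foldl (fun d a => d.insert (κ a) (v (d.get? (κ a)) a)) d).get? k
      = (l.filter (fun a => κ a == k)).foldl (fun o a => some (v o a)) (d.get? k) := by
  induction l generalizing d with
  | nil => rfl
  | cons a t ih =>
    simp only [List.foldl_cons, List.filter_cons]
    by_cases h : κ a = k
    · rw [ih]
      simp [h, PySem.Dict.get?_insert_self]
    · rw [ih]
      simp [h, PySem.Dict.get?_insert_of_ne _ _ (Ne.symm h)]

lemma pvScanSim (l : List (Int × Int)) (h : ∀ rc ∈ l, 0 ≤ rc.1 ∧ 0 ≤ rc.2) (o : Option PvS5) :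
    l.foldl (fun s rc =>
        ((match s.1 with | none => some rc.1 | some v => some (min v rc.1)), max s.2.1 rc.1,
         (match s.2.2.1 with | none => some rc.2 | some v => some (min v rc.2)), max s.2.2.2.1 rc.2,
         s.2.2.2.2 + 1)) (pvOfOpt o)
      = pvOfOpt (l.foldl (fun o rc => some (pvStepB o rc)) o) := by
  induction l generalizing o with
  | nil => rfl
  | cons a t ih =>
    have ha := h a (by simp)
    have ht : ∀ rc ∈ t, 0 ≤ rc.1 ∧ 0 ≤ rc.2 := fun rc hm => h rc (by simp [hm])
    simp only [List.foldl_cons]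
    have hstep : ((match (pvOfOpt o).1 with | none => some a.1 | some v => some (min v a.1)),
          max (pvOfOpt o).2.1 a.1,
          (match (pvOfOpt o).2.2.1 with | none => some a.2 | some v => some (min v a.2)),
          max (pvOfOpt o).2.2.2.1 a.2, (pvOfOpt o).2.2.2.2 + 1)
        = pvOfOpt (some (pvStepB o a)) := by
      cases o with
      | none =>
        simp only [pvOfOpt, pvStepB]
        refine Prod.ext ?_ (Prod.ext ?_ (Prod.ext ?_ (Prod.ext ?_ ?_))) <;> simp <;> omega
      | some s =>
        simp only [pvOfOpt, pvStepB]
        refine Prod.ext ?_ (Prod.ext ?_ (Prod.ext ?_ (Prod.ext ?_ ?_))) <;> simp [min_def, max_def] <;>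
          split_ifs <;> omega
    rw [hstep, ih ht]

-- pvPassB, flattened over the cell list and split into its two independent dict folds
lemma pvPassB_eq (grid : List (List Int)) (rows cols : Int) :
    pvPassB grid rows cols
      = ((pvCells0 rows cols).foldl
           (fun d rc => d.modify (pvCell grid rc.1 rc.2) 0 (· + 1)) (PySem.Dict.empty : PySem.Dict Int Int),
         (pvCells0 rows cols).foldl
           (fun d rc => d.insert (pvCell grid rc.1 rc.2) (pvStepB (d.get? (pvCell grid rc.1 rc.2)) rc))
           (PySem.Dict.empty : PySem.Dict Int PvS5)) := by
  have h1 : pvPassB grid rows cols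
      = (pvCells0 rows cols).foldl (fun st rc =>
          (st.1.modify (pvCell grid rc.1 rc.2) 0 (· + 1),
           match st.2.get? (pvCell grid rc.1 rc.2) with
           | none => st.2.insert (pvCell grid rc.1 rc.2) (rc.1, rc.1, rc.2, rc.2, 1)
           | some s => st.2.insert (pvCell grid rc.1 rc.2)
               (if rc.1 < s.1 then rc.1 else s.1, if s.2.1 < rc.1 then rc.1 else s.2.1,
                if rc.2 < s.2.2.1 then rc.2 else s.2.2.1, if s.2.2.2.1 < rc.2 then rc.2 else s.2.2.2.1,
                s.2.2.2.2 + 1)))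
          ((PySem.Dict.empty : PySem.Dict Int Int), (PySem.Dict.empty : PySem.Dict Int PvS5)) := by
    unfold pvPassB
    exact pvNest rows cols _ _
  rw [h1]
  have hfun : (fun (st : PySem.Dict Int Int × PySem.Dict Int PvS5) (rc : Int × Int) =>
        (st.1.modify (pvCell grid rc.1 rc.2) 0 (· + 1),
         match st.2.get? (pvCell grid rc.1 rc.2) with
         | none => st.2.insert (pvCell grid rc.1 rc.2) (rc.1, rc.1, rc.2, rc.2, 1)
         | some s => st.2.insert (pvCell grid rc.1 rc.2)
             (if rc.1 < s.1 then rc.1 else s.1, if s.2.1 < rc.1 then rc.1 else s.2.1,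
              if rc.2 < s.2.2.1 then rc.2 else s.2.2.1, if s.2.2.2.1 < rc.2 then rc.2 else s.2.2.2.1,
              s.2.2.2.2 + 1)))
      = (fun st rc =>
          (st.1.modify (pvCell grid rc.1 rc.2) 0 (· + 1),
           st.2.insert (pvCell grid rc.1 rc.2) (pvStepB (st.2.get? (pvCell grid rc.1 rc.2)) rc))) := by
    funext st rc
    cases hg : st.2.get? (pvCell grid rc.1 rc.2) <;> simp [pvStepB]
  rw [hfun]
  exact PySem.List.foldl_prod_mk
    (fun d rc => d.modify (pvCell grid rc.1 rc.2) 0 (· + 1))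
    (fun d rc => d.insert (pvCell grid rc.1 rc.2) (pvStepB (d.get? (pvCell grid rc.1 rc.2)) rc))
    (pvCells0 rows cols) (PySem.Dict.empty : PySem.Dict Int Int) (PySem.Dict.empty : PySem.Dict Int PvS5)

lemma pvCounts_eq (grid : List (List Int)) (rows cols : Int) :
    (pvPassB grid rows cols).1 = pvCountsA grid rows cols := by
  rw [pvPassB_eq]
  exact (pvNest rows cols (fun d r c => d.modify (pvCell grid r c) 0 (· + 1)) (PySem.Dict.empty : PySem.Dict Int Int)).symm

lemma pvStats_get? (grid : List (List Int)) (rows cols k : Int) :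
    (pvPassB grid rows cols).2.get? k
      = ((pvCells0 rows cols).filter (fun rc => pvCell grid rc.1 rc.2 == k)).foldl
          (fun o rc => some (pvStepB o rc)) none := by
  rw [pvPassB_eq]
  exact pvDictFold_get? (fun rc => pvCell grid rc.1 rc.2) pvStepB (pvCells0 rows cols) (PySem.Dict.empty : PySem.Dict Int PvS5) k

lemma pvScan_eq (grid : List (List Int)) (rows cols k : Int) :
    pvScanA grid rows cols k = pvOfOpt ((pvPassB grid rows cols).2.get? k) := by
  have h1 : pvScanA grid rows cols k
      = (pvCells0 rows cols).foldl (fun s rc =>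
          if pvCell grid rc.1 rc.2 == k then
            ((match s.1 with | none => some rc.1 | some v => some (min v rc.1)), max s.2.1 rc.1,
             (match s.2.2.1 with | none => some rc.2 | some v => some (min v rc.2)), max s.2.2.2.1 rc.2,
             s.2.2.2.2 + 1)
          else s) (none, -1, none, -1, 0) :=
    pvNest rows cols (fun s r c =>
      if pvCell grid r c == k then
        ((match s.1 with | none => some r | some v => some (min v r)), max s.2.1 r,
         (match s.2.2.1 with | none => some c | some v => some (min v c)), max s.2.2.2.1 c,
         s.2.2.2.2 + 1)
      else s) (none, -1, none, -1, 0)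
  rw [h1, PySem.List.foldl_if_eq_foldl_filter, pvStats_get? grid rows cols k]
  exact pvScanSim _ (fun rc hm => pvCells0_pos rows cols rc (List.mem_of_mem_filter hm)) none

lemma pvSel_eq (grid : List (List Int)) (rows cols bg : Int) (mc : List (Int × Int)) :
    (((mc.filter (fun p => p.1 != bg)).map (fun p => p.1)).foldl (fun acc color =>
      match pvScanA grid rows cols color with
      | (some mr, mxr, some mc', mxc, cnt) =>
        if (mxr - mr + 1) * (mxc - mc' + 1) == cnt &&
            (match acc.2.2 with | none => true | some m => decide ((mxr - mr + 1) * (mxc - mc' + 1) < m)) then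
          (some color, some (mr, mc', mxr, mxc), some ((mxr - mr + 1) * (mxc - mc' + 1)))
        else acc
      | _ => acc)
      ((none : Option Int), (none : Option (Int × Int × Int × Int)), (none : Option Int)))
    = mc.foldl (fun acc p =>
      if p.1 == bg then acc
      else
        if ((((pvPassB grid rows cols).2.getD p.1 (0, 0, 0, 0, 0)).2.1 - ((pvPassB grid rows cols).2.getD p.1 (0, 0, 0, 0, 0)).1 + 1) *
            (((pvPassB grid rows cols).2.getD p.1 (0, 0, 0, 0, 0)).2.2.2.1 - ((pvPassB grid rows cols).2.getD p.1 (0, 0, 0, 0, 0)).2.2.1 + 1)) ==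
              ((pvPassB grid rows cols).2.getD p.1 (0, 0, 0, 0, 0)).2.2.2.2 &&
            (match acc.2.2 with
             | some m => decide (((((pvPassB grid rows cols).2.getD p.1 (0, 0, 0, 0, 0)).2.1 - ((pvPassB grid rows cols).2.getD p.1 (0, 0, 0, 0, 0)).1 + 1) *
                 (((pvPassB grid rows cols).2.getD p.1 (0, 0, 0, 0, 0)).2.2.2.1 - ((pvPassB grid rows cols).2.getD p.1 (0, 0, 0, 0, 0)).2.2.1 + 1)) < m)
             | none => true) then
          (some p.1,
           some (((pvPassB grid rows cols).2.getD p.1 (0, 0, 0, 0, 0)).1, ((pvPassB grid rows cols).2.getD p.1 (0, 0, 0, 0, 0)).2.2.1,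
                 ((pvPassB grid rows cols).2.getD p.1 (0, 0, 0, 0, 0)).2.1, ((pvPassB grid rows cols).2.getD p.1 (0, 0, 0, 0, 0)).2.2.2.1),
           some ((((pvPassB grid rows cols).2.getD p.1 (0, 0, 0, 0, 0)).2.1 - ((pvPassB grid rows cols).2.getD p.1 (0, 0, 0, 0, 0)).1 + 1) *
                 (((pvPassB grid rows cols).2.getD p.1 (0, 0, 0, 0, 0)).2.2.2.1 - ((pvPassB grid rows cols).2.getD p.1 (0, 0, 0, 0, 0)).2.2.1 + 1)))
        else acc)
      ((none : Option Int), (none : Option (Int × Int × Int × Int)), (none : Option Int)) := by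
  rw [List.foldl_map]
  rw [show (fun (acc : Option Int × Option (Int × Int × Int × Int) × Option Int) (p : Int × Int) =>
      if p.1 == bg then acc
      else
        if ((((pvPassB grid rows cols).2.getD p.1 (0, 0, 0, 0, 0)).2.1 - ((pvPassB grid rows cols).2.getD p.1 (0, 0, 0, 0, 0)).1 + 1) *
            (((pvPassB grid rows cols).2.getD p.1 (0, 0, 0, 0, 0)).2.2.2.1 - ((pvPassB grid rows cols).2.getD p.1 (0, 0, 0, 0, 0)).2.2.1 + 1)) ==
              ((pvPassB grid rows cols).2.getD p.1 (0, 0, 0, 0, 0)).2.2.2.2 &&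
            (match acc.2.2 with
             | some m => decide (((((pvPassB grid rows cols).2.getD p.1 (0, 0, 0, 0, 0)).2.1 - ((pvPassB grid rows cols).2.getD p.1 (0, 0, 0, 0, 0)).1 + 1) *
                 (((pvPassB grid rows cols).2.getD p.1 (0, 0, 0, 0, 0)).2.2.2.1 - ((pvPassB grid rows cols).2.getD p.1 (0, 0, 0, 0, 0)).2.2.1 + 1)) < m)
             | none => true) then
          (some p.1,
           some (((pvPassB grid rows cols).2.getD p.1 (0, 0, 0, 0, 0)).1, ((pvPassB grid rows cols).2.getD p.1 (0, 0, 0, 0, 0)).2.2.1,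
                 ((pvPassB grid rows cols).2.getD p.1 (0, 0, 0, 0, 0)).2.1, ((pvPassB grid rows cols).2.getD p.1 (0, 0, 0, 0, 0)).2.2.2.1),
           some ((((pvPassB grid rows cols).2.getD p.1 (0, 0, 0, 0, 0)).2.1 - ((pvPassB grid rows cols).2.getD p.1 (0, 0, 0, 0, 0)).1 + 1) *
                 (((pvPassB grid rows cols).2.getD p.1 (0, 0, 0, 0, 0)).2.2.2.1 - ((pvPassB grid rows cols).2.getD p.1 (0, 0, 0, 0, 0)).2.2.1 + 1)))
        else acc)
    = (fun acc p =>
      if (p.1 != bg) then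
        (if ((((pvPassB grid rows cols).2.getD p.1 (0, 0, 0, 0, 0)).2.1 - ((pvPassB grid rows cols).2.getD p.1 (0, 0, 0, 0, 0)).1 + 1) *
            (((pvPassB grid rows cols).2.getD p.1 (0, 0, 0, 0, 0)).2.2.2.1 - ((pvPassB grid rows cols).2.getD p.1 (0, 0, 0, 0, 0)).2.2.1 + 1)) ==
              ((pvPassB grid rows cols).2.getD p.1 (0, 0, 0, 0, 0)).2.2.2.2 &&
            (match acc.2.2 with
             | some m => decide (((((pvPassB grid rows cols).2.getD p.1 (0, 0, 0, 0, 0)).2.1 - ((pvPassB grid rows cols).2.getD p.1 (0, 0, 0, 0, 0)).1 + 1) *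
                 (((pvPassB grid rows cols).2.getD p.1 (0, 0, 0, 0, 0)).2.2.2.1 - ((pvPassB grid rows cols).2.getD p.1 (0, 0, 0, 0, 0)).2.2.1 + 1)) < m)
             | none => true) then
          (some p.1,
           some (((pvPassB grid rows cols).2.getD p.1 (0, 0, 0, 0, 0)).1, ((pvPassB grid rows cols).2.getD p.1 (0, 0, 0, 0, 0)).2.2.1,
                 ((pvPassB grid rows cols).2.getD p.1 (0, 0, 0, 0, 0)).2.1, ((pvPassB grid rows cols).2.getD p.1 (0, 0, 0, 0, 0)).2.2.2.1),
           some ((((pvPassB grid rows cols).2.getD p.1 (0, 0, 0, 0, 0)).2.1 - ((pvPassB grid rows cols).2.getD p.1 (0, 0, 0, 0, 0)).1 + 1) *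
                 (((pvPassB grid rows cols).2.getD p.1 (0, 0, 0, 0, 0)).2.2.2.1 - ((pvPassB grid rows cols).2.getD p.1 (0, 0, 0, 0, 0)).2.2.1 + 1)))
        else acc)
      else acc) from by
      funext acc p
      by_cases h : p.1 = bg <;> simp [h]]
  rw [PySem.List.foldl_if_eq_foldl_filter]
  apply PySem.List.foldl_congr_mem
  intro acc p _
  rw [pvScan_eq grid rows cols p.1]
  cases hg : (pvPassB grid rows cols).2.get? p.1 with
  | none =>
    have hd : (pvPassB grid rows cols).2.getD p.1 (0, 0, 0, 0, 0) = ((0 : Int), (0 : Int), (0 : Int), (0 : Int), (0 : Int)) := by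
      simp [PySem.Dict.getD, hg]
    rw [hd]
    simp [pvOfOpt]
  | some s =>
    have hd : (pvPassB grid rows cols).2.getD p.1 (0, 0, 0, 0, 0) = s := by
      simp [PySem.Dict.getD, hg]
    rw [hd]
    simp only [pvOfOpt]
    cases acc.2.2 <;> rfl

lemma pvFinal (sel : Option Int × Option (Int × Int × Int × Int) × Option Int)
    (g : Int → (Int × Int × Int × Int) → List (List Int)) (out : List (List Int)) :
    (match sel.1, sel.2.1 with | some fc, some bbox => g fc bbox | _, _ => out)
      = (match sel.2.1 with
         | none => out
         | some bbox => match sel.1 with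
           | none => out
           | some fc => g fc bbox) := by
  obtain ⟨f, b, m⟩ := sel
  cases f <;> cases b <;> rfl

lemma transform_eq (grid : List (List Int)) : transform grid = transform_alt grid := by
  simp only [transform, transform_alt]
  rw [pvCounts_eq]
  cases hmc : pvMostCommon (pvCountsA grid (PySem.List.len grid)
      (PySem.List.len (PySem.List.pyGetD grid 0 []))) with
  | nil => rfl
  | cons p0 t =>
    dsimp only [List.head?]
    rw [pvSel_eq grid (PySem.List.len grid)
      (PySem.List.len (PySem.List.pyGetD grid 0 [])) p0.1 (p0 :: t)]
    exact pvFinal _ _ _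

-- ===== VERDICT (by name: the statement is the Claim_ definition above) =====
theorem transform_spec : Claim_equal_transform := by
  intro grid _ _
  unfold Spec_transform
  exact transform_eq grid
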